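-- pv_equiv track=rewrite | github.com/nikozhuharov/Python-Fundamentals | Functions - Exercise/10. List Manipulator.py | max_even_odd
-- ===== SOURCE A (Python) =====
-- def find_index(element, input_list):
--     for i in range(len(input_list)):
--         if input_list[i] == element:
--             index = i
--     return index
--
-- def max_even_odd(filter, input_list):
--     if filter == "even":
--         even_list = [x for x in input_list if x % 2 == 0]
--         if not even_list:
--             return "No matches"
--         else:
--             return find_index(max(even_list), input_list)
--     elif filter == "odd":
--         odd_list = [x for x in input_list if x % 2 != 0]
--         if not odd_list:
--             return "No matches"
--         else:
--             return find_index(max(odd_list), input_list)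
-- ===== SOURCE B (Python) =====
-- def max_even_odd(filter, input_list):
--     if filter == "even":
--         rem = 0
--     elif filter == "odd":
--         rem = 1
--     else:
--         return None
--     best_value = None
--     best_index = None
--     for i, x in enumerate(input_list):
--         if x % 2 == rem:
--             if best_value is None or x >= best_value:
--                 best_value = x
--                 best_index = i
--     return "No matches" if best_index is None else best_index
-- ===== Notes on version B (the rewrite author's own statement) =====
-- stated objective: simpler
-- what changed: Replaces A's three passes (filter comprehension, max(), then a full find_index scan) by one single pass tracking the best value and the last index achieving it (update on >=); B reproduces A's value on every input, including the string 'No matches'.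
-- outside the precondition, e.g. on max_even_odd('even', [1]): A returns 'No matches', B returns 'No matches'
import Mathlib
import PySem

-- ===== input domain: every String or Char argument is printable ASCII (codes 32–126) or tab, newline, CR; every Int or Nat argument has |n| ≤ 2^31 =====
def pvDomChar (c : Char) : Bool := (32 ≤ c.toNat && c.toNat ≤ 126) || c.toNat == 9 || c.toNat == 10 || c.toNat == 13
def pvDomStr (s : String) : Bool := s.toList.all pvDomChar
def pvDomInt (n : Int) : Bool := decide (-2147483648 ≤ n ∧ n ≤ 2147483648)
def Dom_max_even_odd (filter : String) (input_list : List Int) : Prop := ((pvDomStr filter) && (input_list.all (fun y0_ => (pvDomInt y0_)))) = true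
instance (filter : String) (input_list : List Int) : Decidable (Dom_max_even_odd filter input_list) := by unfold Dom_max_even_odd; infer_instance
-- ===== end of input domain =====

-- B fuses A's three passes (filter comprehension, max(), find_index scan) into one pass tracking
-- the best value and the last index achieving it; in Python, B returns A's exact value on EVERY
-- input, including the string "No matches"; only the Lean claim restricts to the Option Int cases.

-- ===== PORT A =====
-- find_index: for i in range(len(xs)): remember the LAST i with xs[i] == element;
-- none = the NameError when element never occurs (unreachable from max_even_odd under Pre_).
-- xs[i] is ported as pyGetD (i is always in range here).
def find_index (element : Int) (xs : List Int) : Option Int :=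
  (PySem.List.pyRange 0 xs.length 1).foldl
    (fun acc i => if PySem.List.pyGetD xs i 0 = element then some i else acc) none

def max_even_odd (filter : String) (input_list : List Int) : Option Int :=
  if filter = "even" then
    let even_list := input_list.filter (fun x => PySem.Int.mod x 2 == 0)
    if even_list = [] then none  -- Python returns the str "No matches" here, not an Option Int: outside Pre_
    else
      match PySem.List.max? even_list (fun y => y) with
      | some m => find_index m input_list
      | none => none
  else if filter = "odd" then
    let odd_list := input_list.filter (fun x => PySem.Int.mod x 2 != 0)
    if odd_list = [] then none  -- Python returns the str "No matches" here, not an Option Int: outside Pre_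
    else
      match PySem.List.max? odd_list (fun y => y) with
      | some m => find_index m input_list
      | none => none
  else none

-- ===== PORT B =====
-- single pass over enumerate(input_list): best (value, index) so far; both updated on >=,
-- so ties keep the LAST occurrence of the maximum
def bestFold (r : Int) (xs : List Int) : Option (Int × Int) :=
  (PySem.List.enumerate xs).foldl
    (fun acc p =>
      if PySem.Int.mod p.2 2 = r then
        match acc with
        | none => some (p.2, p.1)
        | some (bv, bi) => if bv ≤ p.2 then some (p.2, p.1) else some (bv, bi)
      else acc) none

def max_even_odd_alt (filter : String) (input_list : List Int) : Option Int :=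
  if filter = "even" then
    match bestFold 0 input_list with
    | none => none  -- Python B returns the str "No matches" here, identical to A: outside Pre_
    | some (_, bi) => some bi
  else if filter = "odd" then
    match bestFold 1 input_list with
    | none => none  -- Python B returns the str "No matches" here, identical to A: outside Pre_
    | some (_, bi) => some bi
  else none

-- ===== PRECONDITION & SPEC =====
-- On "even"/"odd" inputs with no element of the requested parity, A and B both return the SAME
-- string "No matches" (B reproduces A there in Python); those inputs are outside Pre_ solely
-- because a str is not a value of the required Option Int return type, so the agreement there
-- cannot be stated in the Lean claim.
def Pre_max_even_odd (filter : String) (input_list : List Int) : Prop :=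
  (filter = "even" → ∃ x ∈ input_list, PySem.Int.mod x 2 = 0) ∧
  (filter = "odd" → ∃ x ∈ input_list, PySem.Int.mod x 2 = 1)
instance (filter : String) (input_list : List Int) : Decidable (Pre_max_even_odd filter input_list) := by
  unfold Pre_max_even_odd; infer_instance

def pvWitness_max_even_odd : String × List Int := ("even", [3, 2, 4, 4, 1])

def Spec_max_even_odd (filter : String) (input_list : List Int) (out : Option Int) : Prop := out = max_even_odd_alt filter input_list
instance (filter : String) (input_list : List Int) (out : Option Int) : Decidable (Spec_max_even_odd filter input_list out) := by unfold Spec_max_even_odd; infer_instance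

-- ===== CLAIM (what is proved, stated in full; the proofs are below) =====
def Claim_equal_max_even_odd : Prop := ∀ (filter : String) (input_list : List Int), Dom_max_even_odd filter input_list → Pre_max_even_odd filter input_list → Spec_max_even_odd filter input_list (max_even_odd filter input_list)

-- ===== LEMMAS AND PROOFS =====

-- find_index on a snoc: the last index wins
theorem find_index_append (e y : Int) (xs : List Int) :
    find_index e (xs ++ [y]) =
      if y = e then some (xs.length : Int) else find_index e xs := by
  unfold find_index
  have h1 : ((xs ++ [y]).length : Int) = (xs.length : Int) + 1 := by
    simp
  rw [h1, PySem.List.pyRange_one_succ_right (by positivity), List.foldl_append]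
  have h2 : PySem.List.pyGetD (xs ++ [y]) (xs.length : Int) 0 = y := by
    rw [PySem.List.pyGetD_natCast]
    simp
  have h3 : (PySem.List.pyRange 0 (xs.length : Int) 1).foldl
      (fun acc i => if PySem.List.pyGetD (xs ++ [y]) i 0 = e then some i else acc) none =
      (PySem.List.pyRange 0 (xs.length : Int) 1).foldl
      (fun acc i => if PySem.List.pyGetD xs i 0 = e then some i else acc) none := by
    apply PySem.List.foldl_congr_mem
    intro acc i hi
    rw [PySem.List.mem_pyRange_one] at hi
    have hgd : PySem.List.pyGetD (xs ++ [y]) i 0 = PySem.List.pyGetD xs i 0 := by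
      rw [PySem.List.pyGetD_eq_getElem (xs ++ [y]) 0 (by omega) (by simp; omega),
          PySem.List.pyGetD_eq_getElem xs 0 (by omega) (by omega)]
      exact List.getElem_append_left (by omega)
    rw [hgd]
  simp only [List.foldl_cons, List.foldl_nil, h2, h3]

-- one step of B's pass, peeled off at the right end
theorem bestFold_append (r y : Int) (xs : List Int) :
    bestFold r (xs ++ [y]) =
      (if PySem.Int.mod y 2 = r then
        match bestFold r xs with
        | none => some (y, (xs.length : Int))
        | some (bv, bi) => if bv ≤ y then some (y, (xs.length : Int)) else some (bv, bi)
      else bestFold r xs) := by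
  unfold bestFold
  rw [PySem.List.enumerate_append, List.foldl_append]
  simp [PySem.List.enumerate]

-- the invariant tying B's single pass to A's filter/max/find_index pipeline
theorem bestFold_key (r : Int) (xs : List Int) :
    (xs.filter (fun x => PySem.Int.mod x 2 == r) = [] ∧ bestFold r xs = none) ∨
    (∃ m j, PySem.List.max? (xs.filter (fun x => PySem.Int.mod x 2 == r)) (fun y => y) = some m ∧
        bestFold r xs = some (m, j) ∧ find_index m xs = some j) := by
  induction xs using List.reverseRecOn with
  | nil => left; constructor <;> rfl
  | append_singleton xs y ih =>
    rw [bestFold_append, List.filter_append]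
    have hmod : ∀ a : Int, PySem.Int.mod a 2 = a % 2 := fun a => PySem.Int.mod_eq_emod_of_pos (by norm_num)
    by_cases hy : PySem.Int.mod y 2 = r
    · have hfy : List.filter (fun x => PySem.Int.mod x 2 == r) [y] = [y] := by
        rw [List.filter_singleton, beq_iff_eq.mpr hy, cond_true]
      rw [hfy, if_pos hy]
      rcases ih with ⟨hF, hbf⟩ | ⟨m, j, hmax, hbf, hfi⟩
      · right
        refine ⟨y, (xs.length : Int), ?_, ?_, ?_⟩
        · rw [hF, List.nil_append, PySem.List.max?_id_cons]; rfl
        · rw [hbf]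
        · rw [find_index_append, if_pos rfl]
      · right
        have hFne : xs.filter (fun x => PySem.Int.mod x 2 == r) ≠ [] := by
          intro h; rw [h, (PySem.List.max?_eq_none_iff _ _).mpr rfl] at hmax; simp at hmax
        obtain ⟨f, t, hft⟩ := List.exists_cons_of_ne_nil hFne
        rw [hft, PySem.List.max?_id_cons, Option.some_inj] at hmax
        rw [hft]
        have hcons : f :: t ++ [y] = f :: (t ++ [y]) := by simp
        rw [hcons, PySem.List.max?_id_cons, List.foldl_append, List.foldl_cons, List.foldl_nil]
        rw [hbf]
        by_cases hle : m ≤ y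
        · refine ⟨y, (xs.length : Int), ?_, ?_, ?_⟩
          · rw [hmax]; rw [max_eq_right hle]
          · dsimp only; rw [if_pos hle]
          · rw [find_index_append, if_pos rfl]
        · have hlt : y < m := lt_of_not_ge hle
          refine ⟨m, j, ?_, ?_, ?_⟩
          · rw [hmax, max_eq_left (le_of_lt hlt)]
          · dsimp only; rw [if_neg hle]
          · rw [find_index_append, if_neg (by omega)]
            exact hfi
    · have hfy : List.filter (fun x => PySem.Int.mod x 2 == r) [y] = [] := by
        rw [List.filter_singleton, Bool.cond_eq_ite, if_neg (fun h => hy (beq_iff_eq.mp h))]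
      rw [hfy, List.append_nil, if_neg hy]
      rcases ih with ⟨hF, hbf⟩ | ⟨m, j, hmax, hbf, hfi⟩
      · left; exact ⟨hF, hbf⟩
      · right
        refine ⟨m, j, hmax, hbf, ?_⟩
        have hm : m ∈ xs.filter (fun x => PySem.Int.mod x 2 == r) := PySem.List.max?_mem hmax
        have hmr : PySem.Int.mod m 2 = r := by
          simp only [List.mem_filter, beq_iff_eq] at hm; exact hm.2
        rw [find_index_append, if_neg (by intro h; exact hy (h ▸ hmr))]
        exact hfi

theorem branch_even (xs : List Int) (h : ∃ x ∈ xs, PySem.Int.mod x 2 = 0) :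
    (let even_list := xs.filter (fun x => PySem.Int.mod x 2 == 0)
     if even_list = [] then none
     else
       match PySem.List.max? even_list (fun y => y) with
       | some m => find_index m xs
       | none => none) =
    (match bestFold 0 xs with
     | none => (none : Option Int)
     | some (_, bi) => some bi) := by
  rcases bestFold_key 0 xs with ⟨hF, hbf⟩ | ⟨m, j, hmax, hbf, hfi⟩
  · exfalso
    obtain ⟨x, hxmem, hx0⟩ := h
    have hx : x ∈ xs.filter (fun x => PySem.Int.mod x 2 == 0) :=
      List.mem_filter.mpr ⟨hxmem, beq_iff_eq.mpr hx0⟩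
    rw [hF] at hx; simp at hx
  · have hFne : ¬(xs.filter (fun x => PySem.Int.mod x 2 == 0) = []) := by
      intro hnil; rw [hnil, (PySem.List.max?_eq_none_iff _ _).mpr rfl] at hmax; simp at hmax
    show (if _ = [] then _ else _) = _
    rw [if_neg hFne, hmax, hbf]
    dsimp only
    rw [hfi]

theorem branch_odd (xs : List Int) (h : ∃ x ∈ xs, PySem.Int.mod x 2 = 1) :
    (let odd_list := xs.filter (fun x => PySem.Int.mod x 2 != 0)
     if odd_list = [] then none
     else
       match PySem.List.max? odd_list (fun y => y) with
       | some m => find_index m xs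
       | none => none) =
    (match bestFold 1 xs with
     | none => (none : Option Int)
     | some (_, bi) => some bi) := by
  have hfeq : xs.filter (fun x => PySem.Int.mod x 2 != 0) = xs.filter (fun x => PySem.Int.mod x 2 == 1) :=
    List.filter_congr (fun x _ => by rcases PySem.Int.mod_two_eq x with h0 | h0 <;> rw [h0] <;> rfl)
  show (if _ = [] then _ else _) = _
  rw [hfeq]
  rcases bestFold_key 1 xs with ⟨hF, hbf⟩ | ⟨m, j, hmax, hbf, hfi⟩
  · exfalso
    obtain ⟨x, hxmem, hx1⟩ := h
    have hx : x ∈ xs.filter (fun x => PySem.Int.mod x 2 == 1) :=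
      List.mem_filter.mpr ⟨hxmem, beq_iff_eq.mpr hx1⟩
    rw [hF] at hx; simp at hx
  · have hFne : ¬(xs.filter (fun x => PySem.Int.mod x 2 == 1) = []) := by
      intro hnil; rw [hnil, (PySem.List.max?_eq_none_iff _ _).mpr rfl] at hmax; simp at hmax
    rw [if_neg hFne, hmax, hbf]
    dsimp only
    rw [hfi]

-- ===== VERDICT (by name: the statement is the Claim_ definition above) =====
theorem max_even_odd_spec : Claim_equal_max_even_odd := by
  intro filter xs _ hpre
  unfold Spec_max_even_odd max_even_odd max_even_odd_alt
  by_cases he : filter = "even"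
  · rw [if_pos he, if_pos he]; exact branch_even xs (hpre.1 he)
  · by_cases ho : filter = "odd"
    · rw [if_neg he, if_pos ho, if_neg he, if_pos ho]; exact branch_odd xs (hpre.2 ho)
    · rw [if_neg he, if_neg ho, if_neg he, if_neg ho]
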